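-- pv_equiv track=rewrite | github.com/gathertown/grapevine | connectors/linear/linear_helpers.py | normalize_user_names_in_activities
-- ===== SOURCE A (Python) =====
-- from typing import Any
--
-- def normalize_user_names_in_activities(activities: list[dict[str, Any]]) -> list[dict[str, Any]]:
--     """Normalize user names across activities to ensure consistency.
--
--     For each unique actor_id, uses the best available display name (preferring displayName over name)
--     and applies it consistently to all activities by that user.
--
--     Args:
--         activities: List of activity dictionaries with actor and actor_id fields
--
--     Returns:
--         List of activities with normalized actor names
--     """
--     if not activities:
--         return activities
--
--     user_name_map: dict[str, str] = {}
--
--     for activity in activities: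
--         actor_id = activity.get("actor_id", "")
--         actor_name = activity.get("actor", "")
--
--         if not actor_id or not actor_name:
--             continue
--
--         if actor_id not in user_name_map or len(actor_name) > len(user_name_map[actor_id]):
--             user_name_map[actor_id] = actor_name
--
--     normalized_activities = []
--     for activity in activities:
--         activity_copy = activity.copy()
--         actor_id = activity_copy.get("actor_id", "")
--
--         if actor_id and actor_id in user_name_map:
--             activity_copy["actor"] = user_name_map[actor_id]
--
--         normalized_activities.append(activity_copy)
--
--     return normalized_activities
-- ===== SOURCE B (Python) =====
-- def normalize_user_names_in_activities(activities):
--     """Flatten to (actor_id, actor) pairs, answer longest-name queries by scanning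
--     that pair list, and build the result with a comprehension (no dict of bests)."""
--     pairs = [(a.get("actor_id", ""), a.get("actor", "")) for a in activities]
--     pairs = [(i, n) for i, n in pairs if i and n]
--
--     def best(aid):
--         return max((n for i, n in pairs if i == aid), key=len)
--
--     out = []
--     for activity in activities:
--         copy = dict(activity)
--         aid = copy.get("actor_id", "")
--         if any(i == aid for i, _ in pairs):
--             copy["actor"] = best(aid)
--         out.append(copy)
--     return out
-- ===== Notes on version B (the rewrite author's own statement) =====
-- stated objective: alternative
-- what changed: Replaces A's incremental dict of running-longest names with a dict-free two-stage shape: flatten activities to a filtered (actor_id, actor) pair list, answer each best-name lookup by max(key=len) over a scan of that list (first maximal element, matching A's strict '>' update), and build the output by a per-activity comprehension-style map instead of A's accumulator loop.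
import Mathlib
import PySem

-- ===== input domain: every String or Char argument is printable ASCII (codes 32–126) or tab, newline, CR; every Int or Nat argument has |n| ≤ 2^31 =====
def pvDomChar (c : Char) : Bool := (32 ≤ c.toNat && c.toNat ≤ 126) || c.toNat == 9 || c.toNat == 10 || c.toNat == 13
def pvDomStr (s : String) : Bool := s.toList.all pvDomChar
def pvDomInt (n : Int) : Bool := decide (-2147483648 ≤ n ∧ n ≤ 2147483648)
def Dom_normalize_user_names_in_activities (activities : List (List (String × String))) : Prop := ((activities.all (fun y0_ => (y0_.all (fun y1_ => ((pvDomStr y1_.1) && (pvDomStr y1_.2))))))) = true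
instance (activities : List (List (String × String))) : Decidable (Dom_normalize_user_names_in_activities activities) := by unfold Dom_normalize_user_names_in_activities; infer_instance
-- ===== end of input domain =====

-- B drops A's incremental longest-name dict: it flattens to a filtered (actor_id, actor) pair list,
-- answers each lookup by a max(key=len) scan of that list, and maps over the activities to build the
-- output; same return value, objective: alternative decomposition (no speed claim).
-- Equivalence is about the RETURN value (neither program mutates its argument).

-- ===== PORT A =====
-- activity.get(k, "") on an association-list dict (first match wins)
def pvDictGet (a : List (String × String)) (k : String) : String :=
  (PySem.Dict.mk a).getD k ""

-- one iteration of A's first loop: record the name when the id is new or the name strictly longer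
def pvAStep (m : PySem.Dict String String) (a : List (String × String)) : PySem.Dict String String :=
  let actor_id := pvDictGet a "actor_id"
  let actor_name := pvDictGet a "actor"
  if actor_id = "" ∨ actor_name = "" then m
  else if m.contains actor_id = false ∨ PySem.Str.len actor_name > PySem.Str.len (m.getD actor_id "") then
    m.insert actor_id actor_name
  else m

def normalize_user_names_in_activities (activities : List (List (String × String))) : List (List (String × String)) :=
  if activities = [] then activities
  else
    let user_name_map := activities.foldl pvAStep PySem.Dict.empty
    -- second loop: copy each activity and overwrite "actor" from the map
    activities.foldl (fun normalized a =>
      let copy := PySem.Dict.mk a                    -- activity.copy()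
      let actor_id := copy.getD "actor_id" ""
      let copy := if actor_id ≠ "" ∧ user_name_map.contains actor_id = true
                  then copy.insert "actor" (user_name_map.getD actor_id "")  -- user_name_map[actor_id]; key present by the guard
                  else copy
      normalized ++ [copy.items]) []

-- ===== PORT B =====
-- pairs = [(a.get("actor_id",""), a.get("actor","")) for a in activities], then the truthiness filter
def pvPairsOf (l : List (List (String × String))) : List (String × String) :=
  (l.map (fun a => ((PySem.Dict.mk a).getD "actor_id" "", (PySem.Dict.mk a).getD "actor" ""))).filter
    (fun p => p.1 != "" && p.2 != "")

-- best(aid) = max((n for i, n in pairs if i == aid), key=len): first maximal-length name in scan order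
def pvBestFor (pairs : List (String × String)) (aid : String) : String :=
  PySem.List.maxD ((pairs.filter (fun p => p.1 == aid)).map (fun p => p.2)) PySem.Str.len ""

def normalize_user_names_in_activities_alt (activities : List (List (String × String))) : List (List (String × String)) :=
  let pairs := pvPairsOf activities
  activities.map (fun a =>
    let copy := PySem.Dict.mk a                      -- dict(activity)
    let aid := copy.getD "actor_id" ""
    if pairs.any (fun p => p.1 == aid)               -- any(i == aid for i, _ in pairs)
    then (copy.insert "actor" (pvBestFor pairs aid)).items
    else copy.items)

-- ===== PRECONDITION & SPEC =====
def Spec_normalize_user_names_in_activities (activities : List (List (String × String))) (out : List (List (String × String))) : Prop := out = normalize_user_names_in_activities_alt activities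
instance (activities : List (List (String × String))) (out : List (List (String × String))) : Decidable (Spec_normalize_user_names_in_activities activities out) := by unfold Spec_normalize_user_names_in_activities; infer_instance

-- ===== CLAIM =====
def Claim_equal_normalize_user_names_in_activities : Prop := ∀ (activities : List (List (String × String))), Dom_normalize_user_names_in_activities activities → Spec_normalize_user_names_in_activities activities (normalize_user_names_in_activities activities)

-- ===== LEMMAS AND PROOFS =====

-- invariant tying A's running map after a prefix to B's pair list of that prefix
def pvInvB (m : PySem.Dict String String) (ps : List (String × String)) : Prop :=
  (∀ k, m.contains k = ps.any (fun p => p.1 == k)) ∧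
  (∀ k, ps.any (fun p => p.1 == k) = true → m.getD k "" = pvBestFor ps k) ∧
  (∀ p ∈ ps, p.1 ≠ "")

lemma pv_len_pos {s : String} (h : s ≠ "") : 0 < PySem.Str.len s := by
  rw [PySem.Str.len_eq]
  have hne : s.toList ≠ [] := fun hh => h (String.toList_eq_nil_iff.mp hh)
  cases hl : s.toList with
  | nil => exact absurd hl hne
  | cons c cs => simp

lemma pv_max?_append_none (ns : List String) (nm : String)
    (h : PySem.List.max? ns PySem.Str.len = none) :
    PySem.List.max? (ns ++ [nm]) PySem.Str.len = some nm := by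
  simp only [PySem.List.max?] at h ⊢
  rw [List.foldl_append, h]
  rfl

lemma pv_max?_append_some (ns : List String) (nm m0 : String)
    (h : PySem.List.max? ns PySem.Str.len = some m0) :
    PySem.List.max? (ns ++ [nm]) PySem.Str.len =
      if PySem.Str.len m0 < PySem.Str.len nm then some nm else some m0 := by
  simp only [PySem.List.max?] at h ⊢
  rw [List.foldl_append, h]
  rfl

lemma pv_maxD_append (ns : List String) (nm : String) (h : nm ≠ "") :
    PySem.List.maxD (ns ++ [nm]) PySem.Str.len "" =
      if PySem.Str.len (PySem.List.maxD ns PySem.Str.len "") < PySem.Str.len nm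
      then nm else PySem.List.maxD ns PySem.Str.len "" := by
  simp only [PySem.List.maxD]
  cases hacc : PySem.List.max? ns PySem.Str.len with
  | none =>
    have h0 : (0 : Int) < PySem.Str.len nm := pv_len_pos h
    have h1 : PySem.Str.len "" = 0 := rfl
    rw [pv_max?_append_none ns nm hacc]
    simp only [Option.getD_none, Option.getD_some, h1]
    rw [if_pos h0]
  | some m0 =>
    rw [pv_max?_append_some ns nm m0 hacc]
    simp only [Option.getD_some]
    split_ifs <;> rfl

-- pvBestFor over a pair list extended by one pair
lemma pv_bestFor_append (ps : List (String × String)) (aid an k : String) (han : an ≠ "") :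
    pvBestFor (ps ++ [(aid, an)]) k =
      if aid = k then
        (if PySem.Str.len (pvBestFor ps k) < PySem.Str.len an then an else pvBestFor ps k)
      else pvBestFor ps k := by
  by_cases hk : aid = k
  · rw [if_pos hk]
    have hfil : List.filter (fun p => p.1 == k) [(aid, an)] = [(aid, an)] := by simp [hk]
    simp only [pvBestFor, List.filter_append, hfil, List.map_append, List.map]
    exact pv_maxD_append _ _ han
  · rw [if_neg hk]
    have hfil : List.filter (fun p => p.1 == k) [(aid, an)] = [] := by
      simp [beq_eq_false_iff_ne.mpr hk]
    simp [pvBestFor, List.filter_append, hfil]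

lemma pv_bestFor_of_none (ps : List (String × String)) (k : String)
    (h : ps.any (fun p => p.1 == k) = false) : pvBestFor ps k = "" := by
  have : ps.filter (fun p => p.1 == k) = [] := by
    rw [List.filter_eq_nil_iff]
    intro p hp
    exact (List.any_eq_false.mp h) p hp
  simp [pvBestFor, this, PySem.List.maxD, PySem.List.max?]

lemma pvInvB_step (m : PySem.Dict String String) (ps : List (String × String))
    (a : List (String × String)) (h : pvInvB m ps) :
    pvInvB (pvAStep m a) (ps ++ pvPairsOf [a]) := by
  obtain ⟨hc, hg, hne⟩ := h
  simp only [pvAStep, pvPairsOf, List.map, List.filter]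
  set aid := pvDictGet a "actor_id" with haid_def
  set an := pvDictGet a "actor" with han_def
  have hget1 : (PySem.Dict.mk a).getD "actor_id" "" = aid := rfl
  have hget2 : (PySem.Dict.mk a).getD "actor" "" = an := rfl
  rw [hget1, hget2]
  by_cases htriv : aid = "" ∨ an = ""
  · rw [if_pos htriv]
    have : (aid != "" && an != "") = false := by
      rcases htriv with h1 | h1 <;> simp [h1]
    rw [this]
    simpa using ⟨hc, hg, hne⟩
  · push Not at htriv
    obtain ⟨haid, han⟩ := htriv
    have hOr : ¬ (aid = "" ∨ an = "") := by push Not; exact ⟨haid, han⟩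
    rw [if_neg hOr]
    have hb : (aid != "" && an != "") = true := by simp [haid, han]
    rw [hb]
    have hne' : ∀ p ∈ ps ++ [(aid, an)], p.1 ≠ "" := by
      intro p hp
      rcases List.mem_append.mp hp with h1 | h1
      · exact hne p h1
      · simp at h1; rw [h1]; exact haid
    have hany : ∀ k, (ps ++ [(aid, an)]).any (fun p => p.1 == k)
        = (ps.any (fun p => p.1 == k) || (aid == k)) := by
      intro k; simp
    by_cases hA : m.contains aid = false ∨ PySem.Str.len an > PySem.Str.len (m.getD aid "") 
    · rw [if_pos hA]
      refine ⟨?_, ?_, hne'⟩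
      · intro k
        rw [PySem.Dict.contains_insert, hany, hc k]
        by_cases hk : k = aid
        · simp [hk]
        · have h1 : (k == aid) = false := beq_eq_false_iff_ne.mpr hk
          have h2 : (aid == k) = false := beq_eq_false_iff_ne.mpr (Ne.symm hk)
          simp [h1, h2]
      · intro k hkany
        rw [pv_bestFor_append _ _ _ _ han, PySem.Dict.getD_insert]
        by_cases hk : k = aid
        · rw [if_pos hk, if_pos hk.symm]
          rcases hA with hnc | hlt
          · have h0 : ps.any (fun p => p.1 == k) = false := by rw [← hc k, hk]; exact hnc
            rw [pv_bestFor_of_none ps k h0]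
            rw [if_pos (show PySem.Str.len "" < PySem.Str.len an from pv_len_pos han)]
          · rw [hk]
            by_cases hps : ps.any (fun p => p.1 == aid) = true
            · rw [← hg aid hps, if_pos hlt]
            · have hps' : ps.any (fun p => p.1 == aid) = false := by
                cases hh : ps.any (fun p => p.1 == aid)
                · rfl
                · exact absurd hh hps
              rw [pv_bestFor_of_none ps aid hps']
              rw [if_pos (show PySem.Str.len "" < PySem.Str.len an from pv_len_pos han)]
        · rw [if_neg hk, if_neg (fun hh => hk hh.symm)]
          have h0 : ps.any (fun p => p.1 == k) = true := by
            rw [hany] at hkany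
            have h2 : (aid == k) = false := beq_eq_false_iff_ne.mpr (fun hh => hk hh.symm)
            simpa [h2] using hkany
          exact hg k h0
    · rw [if_neg hA]
      push Not at hA
      obtain ⟨hmc, hle⟩ := hA
      have hmc' : m.contains aid = true := by
        cases hcc : m.contains aid
        · exact absurd hcc hmc
        · rfl
      refine ⟨?_, ?_, hne'⟩
      · intro k
        rw [hany, hc k]
        by_cases hk : k = aid
        · rw [hk, ← hc aid, hmc']
          simp
        · have h2 : (aid == k) = false := beq_eq_false_iff_ne.mpr (fun hh => hk hh.symm)
          simp [h2]
      · intro k hkany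
        rw [pv_bestFor_append _ _ _ _ han]
        by_cases hk : k = aid
        · have h0 : ps.any (fun p => p.1 == k) = true := by rw [← hc k, hk]; exact hmc'
          have hgk := hg k h0
          rw [if_pos hk.symm, ← hgk]
          have hle' : PySem.Str.len (m.getD k "") = PySem.Str.len (m.getD aid "") := by rw [hk]
          rw [if_neg (by rw [hle']; exact not_lt.mpr hle), hgk]
        · rw [if_neg (fun hh => hk hh.symm)]
          have h0 : ps.any (fun p => p.1 == k) = true := by
            rw [hany] at hkany
            have h2 : (aid == k) = false := beq_eq_false_iff_ne.mpr (fun hh => hk hh.symm)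
            simpa [h2] using hkany
          exact hg k h0

lemma pvPairsOf_cons (a : List (String × String)) (l : List (List (String × String))) :
    pvPairsOf (a :: l) = pvPairsOf [a] ++ pvPairsOf l := by
  simp only [pvPairsOf, List.map, List.filter]
  split <;> simp

lemma pvInvB_fold (l : List (List (String × String))) :
    ∀ m ps, pvInvB m ps → pvInvB (l.foldl pvAStep m) (ps ++ pvPairsOf l) := by
  induction l with
  | nil => intro m ps h; simpa [pvPairsOf] using h
  | cons a l ih =>
    intro m ps h
    have := ih (pvAStep m a) (ps ++ pvPairsOf [a]) (pvInvB_step m ps a h)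
    rw [pvPairsOf_cons]
    simpa [List.append_assoc] using this

lemma pvInvB_empty : pvInvB PySem.Dict.empty [] := by
  refine ⟨?_, ?_, by simp⟩
  · intro k; rw [PySem.Dict.contains_empty]; rfl
  · intro k h; simp at h

-- A's accumulator loop builds exactly the map of its per-activity item
lemma pv_foldl_concat_map (f : List (String × String) → List (String × String))
    (l : List (List (String × String))) (out : List (List (String × String))) :
    l.foldl (fun acc a => acc ++ [f a]) out = out ++ l.map f := by
  induction l generalizing out with
  | nil => simp
  | cons a l ih => simp [ih]

-- ===== VERDICT =====
theorem normalize_user_names_in_activities_spec : Claim_equal_normalize_user_names_in_activities := by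
  intro activities _hdom
  unfold Spec_normalize_user_names_in_activities
  simp only [normalize_user_names_in_activities, normalize_user_names_in_activities_alt]
  by_cases hacts : activities = []
  · subst hacts; rfl
  · rw [if_neg hacts]
    obtain ⟨hc, hg, hne⟩ := pvInvB_fold activities PySem.Dict.empty [] pvInvB_empty
    simp only [List.nil_append] at hc hg hne
    rw [pv_foldl_concat_map, List.nil_append]
    apply List.map_congr_left
    intro a _
    set m := activities.foldl pvAStep PySem.Dict.empty
    set ps := pvPairsOf activities
    set aid := (PySem.Dict.mk a).getD "actor_id" "" with haid
    by_cases hany : ps.any (fun p => p.1 == aid) = true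
    · rw [if_pos hany]
      have haidne : aid ≠ "" := by
        obtain ⟨p, hp, hpk⟩ := List.any_eq_true.mp hany
        have := hne p hp
        rw [eq_of_beq hpk] at this
        exact this
      have hcon : m.contains aid = true := by rw [hc aid]; exact hany
      rw [if_pos ⟨haidne, hcon⟩, hg aid hany]
    · have hany' : ps.any (fun p => p.1 == aid) = false := by
        cases hh : ps.any (fun p => p.1 == aid)
        · rfl
        · exact absurd hh hany
      have hnot : ¬ (ps.any (fun p => p.1 == aid) = true) := by simp [hany']
      rw [if_neg hnot]
      have hcon : m.contains aid = false := by rw [hc aid]; exact hany'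
      rw [if_neg (fun hh => by rw [hcon] at hh; exact Bool.noConfusion hh.2)]
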